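-- pv_equiv track=rewrite | github.com/priitohlo/iti0102-2022 | KT/kt3/exam.py | only_one_pair
-- ===== SOURCE A (Python) =====
-- def only_one_pair(numbers: list) -> bool:
--     """
--     Whether the list only has one pair.
--
--     Function returns True, if the list only has one pair (two elements have the same value).
--     In other cases:
--      there are no elements with the same value
--      there are more than 2 elements with the same value
--      there are several pairs
--     returns False.
--
--     only_one_pair([1, 2, 3]) => False
--     only_one_pair([1]) => False
--     only_one_pair([1, 2, 3, 1]) => True
--     only_one_pair([1, 2, 1, 3, 1]) => False
--     only_one_pair([1, 2, 1, 3, 1, 2]) => False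
--     """
--     dupes = []
--     check_nums = set()
--
--     for e in numbers:
--         if e in check_nums:
--             dupes.append(e)
--         check_nums.add(e)
--
--     return True if len(dupes) == 1 else False
-- ===== SOURCE B (Python) =====
-- def only_one_pair(numbers: list) -> bool:
--     s = sorted(numbers)
--     repeats = 0
--     for a, b in zip(s, s[1:]):
--         if a == b:
--             repeats += 1
--     return repeats == 1
-- ===== Notes on version B (the rewrite author's own statement) =====
-- stated objective: alternative
-- what changed: Replaced the seen-set/dupes-list single pass with sort-then-adjacent-scan: sort the list and count adjacent equal pairs, which equals A's number of repeated occurrences.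
import Mathlib
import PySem

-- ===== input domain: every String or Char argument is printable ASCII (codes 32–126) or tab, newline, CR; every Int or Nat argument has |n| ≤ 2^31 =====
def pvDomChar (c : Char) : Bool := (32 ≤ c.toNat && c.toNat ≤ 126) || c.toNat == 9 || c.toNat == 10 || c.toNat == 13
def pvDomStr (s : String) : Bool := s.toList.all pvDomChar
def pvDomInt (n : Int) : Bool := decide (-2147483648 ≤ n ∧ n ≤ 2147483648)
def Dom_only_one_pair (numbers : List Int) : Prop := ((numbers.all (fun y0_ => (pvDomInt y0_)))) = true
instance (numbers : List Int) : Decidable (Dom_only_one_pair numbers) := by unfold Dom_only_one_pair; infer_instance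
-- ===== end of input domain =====

-- B replaces A's seen-set/dupes-list pass with sort-then-adjacent-scan (objective: alternative).

-- ===== PORT A =====
def only_one_pair (numbers : List Int) : Bool :=
  -- dupes = [];  check_nums = set();  for e in numbers: …  (state = (dupes, check_nums))
  if (numbers.foldl
      (fun (st : List Int × PySem.Set Int) e =>
        (if PySem.Set.contains st.2 e then st.1 ++ [e] else st.1,
         PySem.Set.add st.2 e))
      ([], PySem.Set.empty)).1.length = 1 then true else false

-- ===== PORT B =====
-- 'for a, b in zip(s, s[1:]): if a == b: repeats += 1'  as structural recursion over s
def adjRepeats : List Int → Nat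
  | a :: b :: t => (if a == b then 1 else 0) + adjRepeats (b :: t)
  | _ => 0

def only_one_pair_alt (numbers : List Int) : Bool :=
  adjRepeats (PySem.List.sorted numbers (fun x => x) false) == 1

-- ===== PRECONDITION & SPEC =====
def Spec_only_one_pair (numbers : List Int) (out : Bool) : Prop := out = only_one_pair_alt numbers
instance (numbers : List Int) (out : Bool) : Decidable (Spec_only_one_pair numbers out) := by unfold Spec_only_one_pair; infer_instance

-- ===== CLAIM (what is proved, stated in full; the proofs are below) =====
def Claim_equal_only_one_pair : Prop := ∀ (numbers : List Int), Dom_only_one_pair numbers → Spec_only_one_pair numbers (only_one_pair numbers)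

-- ===== LEMMAS AND PROOFS =====

-- Each loop step of A grows exactly one of the two components by 1.
theorem only_one_pair_loop_sum (xs : List Int) (d : List Int) (s : PySem.Set Int) :
    (xs.foldl
      (fun (st : List Int × PySem.Set Int) e =>
        (if PySem.Set.contains st.2 e then st.1 ++ [e] else st.1,
         PySem.Set.add st.2 e)) (d, s)).1.length
    + (xs.foldl
      (fun (st : List Int × PySem.Set Int) e =>
        (if PySem.Set.contains st.2 e then st.1 ++ [e] else st.1,
         PySem.Set.add st.2 e)) (d, s)).2.length
    = d.length + s.length + xs.length := by
  induction xs generalizing d s with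
  | nil => simp
  | cons e xs ih =>
    simp only [List.foldl_cons]
    rw [ih]
    by_cases h : PySem.Set.contains s e
    · simp [PySem.Set.add, PySem.Set.contains] at *
      simp [h]
      omega
    · simp [PySem.Set.add, PySem.Set.contains] at *
      simp [h]
      omega

-- The second component of A's loop state is the running set.
theorem only_one_pair_loop_snd (xs : List Int) (d : List Int) (s : PySem.Set Int) :
    (xs.foldl
      (fun (st : List Int × PySem.Set Int) e =>
        (if PySem.Set.contains st.2 e then st.1 ++ [e] else st.1,
         PySem.Set.add st.2 e)) (d, s)).2
    = xs.foldl PySem.Set.add s := by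
  induction xs generalizing d s with
  | nil => rfl
  | cons e xs ih => simp only [List.foldl_cons]; exact ih _ _

-- The distinct-element list has as many elements as the Finset of elements.
theorem ofList_length_eq_toFinset_card (xs : List Int) :
    (PySem.Set.ofList xs).length = xs.toFinset.card := by
  have hnd : (PySem.Set.ofList xs).Nodup := PySem.Set.nodup_ofList xs
  have hmem : ∀ a, a ∈ PySem.Set.ofList xs ↔ a ∈ xs := fun a => PySem.Set.mem_ofList xs a
  have : (PySem.Set.ofList xs).toFinset = xs.toFinset := by
    ext a; simp [hmem a]
  rw [← List.toFinset_card_of_nodup hnd, this]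

-- On a ≤-sorted list, adjacent repeats + distinct count = length.
theorem adjRepeats_add_card (s : List Int) (hs : s.Pairwise (· ≤ ·)) :
    adjRepeats s + s.toFinset.card = s.length := by
  induction s with
  | nil => simp [adjRepeats]
  | cons a t ih =>
    match t, hs with
    | [], _ => simp [adjRepeats]
    | b :: u, hs =>
      have hpt : (b :: u).Pairwise (· ≤ ·) := hs.tail
      have hab : a ≤ b := (List.pairwise_cons.mp hs).1 b (by simp)
      have ihs := ih hpt
      by_cases hba : a = b
      · have hfin : (a :: b :: u).toFinset.card = (b :: u).toFinset.card := by
          subst hba; simp [List.toFinset_cons]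
        have hadj : adjRepeats (a :: b :: u) = 1 + adjRepeats (b :: u) := by
          simp [adjRepeats, hba]
        rw [hadj, hfin]; simp only [List.length_cons] at ihs ⊢; omega
      · have hnotmem : a ∉ (b :: u).toFinset := by
          simp only [List.mem_toFinset]
          intro hmem
          rcases List.mem_cons.mp hmem with h | h
          · exact hba h
          · exact hba (le_antisymm hab ((List.pairwise_cons.mp hpt).1 a h))
        have hfin : (a :: b :: u).toFinset.card = (b :: u).toFinset.card + 1 := by
          rw [List.toFinset_cons]
          exact Finset.card_insert_of_notMem hnotmem
        have hadj : adjRepeats (a :: b :: u) = adjRepeats (b :: u) := by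
          simp [adjRepeats, hba]
        rw [hadj, hfin]; simp only [List.length_cons] at ihs ⊢; omega

-- ===== VERDICT (by name: the statement is the Claim_ definition above) =====
theorem only_one_pair_spec : Claim_equal_only_one_pair := by
  intro numbers _
  unfold Spec_only_one_pair only_one_pair only_one_pair_alt
  set D := (numbers.foldl
      (fun (st : List Int × PySem.Set Int) e =>
        (if PySem.Set.contains st.2 e then st.1 ++ [e] else st.1,
         PySem.Set.add st.2 e))
      ([], PySem.Set.empty)).1 with hD
  set s := PySem.List.sorted numbers (fun x => x) false with hsdef
  have hsum := only_one_pair_loop_sum numbers [] PySem.Set.empty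
  have hsnd := only_one_pair_loop_snd numbers [] PySem.Set.empty
  rw [hsnd] at hsum
  rw [← hD] at hsum
  have hcard := ofList_length_eq_toFinset_card numbers
  rw [PySem.Set.ofList_eq_foldl numbers] at hcard
  simp only [PySem.Set.empty, List.length_nil] at hsum hcard
  have hperm : s.Perm numbers := PySem.List.sorted_perm numbers (fun x => x) false
  have hpw : s.Pairwise (· ≤ ·) := by
    have := PySem.List.sorted_pairwise numbers (fun x => x)
    simpa using this
  have hadj := adjRepeats_add_card s hpw
  rw [hperm.length_eq] at hadj
  have hfin : s.toFinset = numbers.toFinset := by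
    ext a; simp [hperm.mem_iff]
  rw [hfin] at hadj
  have key : adjRepeats s = D.length := by omega
  rw [key]
  by_cases h : D.length = 1 <;> simp [h]
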